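-- pv_equiv track=rewrite | github.com/nermadie/CodeForces_Solutions | CodeforcesRound959Div1Div2/prob03_dp.py | solve
-- ===== SOURCE A (Python) =====
-- def solve(n, x, a):
--     prefix_sum = [0] * (n + 1)
--     for i in range(n):
--         prefix_sum[i + 1] = prefix_sum[i] + a[i]
--
--     dp = [0] * (n + 2)
--     right_boundary = n + 1
--     for i in range(n, 0, -1):
--         left = i
--         right = right_boundary
--         while left < right:
--             mid = (left + right) // 2
--             if prefix_sum[mid] - prefix_sum[i - 1] > x:
--                 right = mid
--             else:
--                 left = mid + 1
--         right_boundary = left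
--         dp[i] = dp[left + 1] + (left - i) if left <= n else left - i
--     return sum(dp)
-- ===== SOURCE B (Python) =====
-- def _locate(pref, base, x, lo, hi):
--     if lo >= hi:
--         return lo
--     mid = (lo + hi) // 2
--     if pref[mid] - base > x:
--         return _locate(pref, base, x, lo, mid)
--     return _locate(pref, base, x, mid + 1, hi)
--
--
-- def solve(n, x, a):
--     pref = [0]
--     for v in a[:max(n, 0)]:
--         pref.append(pref[-1] + v)
--     # phase 1: right boundaries, scanned right-to-left
--     lefts = []
--     rb = n + 1
--     for i in range(n, 0, -1):
--         rb = _locate(pref, pref[i - 1], x, i, rb)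
--         lefts.append((i, rb))
--     # phase 2: left-to-right, propagate chain multiplicities forward
--     total = 0
--     bucket = {}
--     for i, l in reversed(lefts):
--         m = 1 + bucket.get(i, 0)
--         total += (l - i) * m
--         bucket[l + 1] = bucket.get(l + 1, 0) + m
--     return total
-- ===== Notes on version B (the rewrite author's own statement) =====
-- stated objective: alternative
-- what changed: Replaces A's backward value-DP over a preallocated dp array (dp[i] = dp[left+1] + left - i, summed at the end) by a forward pass that propagates chain multiplicities through a bucket dict and accumulates the answer directly; the binary search is kept (recursive instead of a while loop) because the prefix sums need not be monotone for arbitrary int inputs, so its exact results must be reproduced.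
import Mathlib
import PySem

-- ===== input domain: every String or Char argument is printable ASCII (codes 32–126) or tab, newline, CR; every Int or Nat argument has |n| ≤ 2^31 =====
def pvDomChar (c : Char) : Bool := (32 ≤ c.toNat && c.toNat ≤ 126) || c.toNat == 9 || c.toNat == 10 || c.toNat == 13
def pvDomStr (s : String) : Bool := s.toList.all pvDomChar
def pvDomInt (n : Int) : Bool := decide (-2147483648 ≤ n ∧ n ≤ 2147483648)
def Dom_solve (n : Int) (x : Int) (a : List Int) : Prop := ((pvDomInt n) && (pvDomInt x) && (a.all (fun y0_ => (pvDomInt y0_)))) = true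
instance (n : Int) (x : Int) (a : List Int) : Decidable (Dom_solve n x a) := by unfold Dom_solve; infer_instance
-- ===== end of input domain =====

-- B replaces A's backward value-DP (dp[i] = dp[left+1] + left-i over a preallocated array,
-- summed at the end) by a forward pass that propagates chain multiplicities through a bucket
-- dict and accumulates the total directly; same binary search (prefix sums need not be
-- monotone, so its exact results must be reproduced). Objective: alternative; not faster.

-- ===== PORT A =====
-- A-side helper: the inner `while left < right` loop of A.
def solveSearch (pref : List Int) (base x lo hi : Int) : Int :=
  if _h : lo < hi then
    let mid := PySem.Int.floordiv (lo + hi) 2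
    if PySem.List.pyGetD pref mid 0 - base > x then
      solveSearch pref base x lo mid
    else
      solveSearch pref base x (mid + 1) hi
  else lo
termination_by (hi - lo).toNat
decreasing_by
  · have h1 := PySem.Int.floordiv_two_mid_bounds (le_of_lt _h)
    have h2 : PySem.Int.floordiv (lo + hi) 2 < hi :=
      (PySem.Int.floordiv_lt_iff_lt_mul (by omega)).mpr (by omega)
    omega
  · have h1 := PySem.Int.floordiv_two_mid_bounds (le_of_lt _h)
    omega

def solvePrefStep (a : List Int) (ps : List Int) (i : Int) : List Int :=
  PySem.List.pySetD ps (i + 1) (PySem.List.pyGetD ps i 0 + PySem.List.pyGetD a i 0)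

def solveStep (n x : Int) (pref : List Int) (st : List Int × Int) (i : Int) : List Int × Int :=
  let l := solveSearch pref (PySem.List.pyGetD pref (i - 1) 0) x i st.2
  (PySem.List.pySetD st.1 i
      (if l ≤ n then PySem.List.pyGetD st.1 (l + 1) 0 + (l - i) else l - i), l)

def solve (n : Int) (x : Int) (a : List Int) : Int :=
  let pref := (PySem.List.pyRange 0 n 1).foldl (solvePrefStep a) (List.replicate (n + 1).toNat 0)
  let st := (PySem.List.pyRange n 0 (-1)).foldl (solveStep n x pref)
      (List.replicate (n + 2).toNat 0, n + 1)
  st.1.sum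

-- ===== PORT B =====
-- B-side helper: the recursive `_locate` binary search.
def altLocate (pref : List Int) (base x lo hi : Int) : Int :=
  if _h : hi ≤ lo then lo
  else
    let mid := PySem.Int.floordiv (lo + hi) 2
    if PySem.List.pyGetD pref mid 0 - base > x then
      altLocate pref base x lo mid
    else
      altLocate pref base x (mid + 1) hi
termination_by (hi - lo).toNat
decreasing_by
  · have h1 := PySem.Int.floordiv_two_mid_bounds (by omega : lo ≤ hi)
    have h2 : PySem.Int.floordiv (lo + hi) 2 < hi :=
      (PySem.Int.floordiv_lt_iff_lt_mul (by omega)).mpr (by omega)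
    omega
  · have h1 := PySem.Int.floordiv_two_mid_bounds (by omega : lo ≤ hi)
    omega

def altPrefStep (p : List Int) (v : Int) : List Int := p ++ [PySem.List.pyGetD p (-1) 0 + v]

def altPhase1Step (pref : List Int) (x : Int) (st : Int × List (Int × Int)) (i : Int) :
    Int × List (Int × Int) :=
  let rb := altLocate pref (PySem.List.pyGetD pref (i - 1) 0) x i st.1
  (rb, st.2 ++ [(i, rb)])

def altPhase2Step (st : Int × PySem.Dict Int Int) (p : Int × Int) : Int × PySem.Dict Int Int :=
  let m := 1 + st.2.getD p.1 0
  (st.1 + (p.2 - p.1) * m, st.2.insert (p.2 + 1) (st.2.getD (p.2 + 1) 0 + m))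

def solve_alt (n : Int) (x : Int) (a : List Int) : Int :=
  let pref := (PySem.List.slice a none (some (max n 0))).foldl altPrefStep [0]
  let ph1 := (PySem.List.pyRange n 0 (-1)).foldl (altPhase1Step pref x) (n + 1, [])
  let ph2 := ph1.2.reverse.foldl altPhase2Step (0, PySem.Dict.empty)
  ph2.1

-- ===== PRECONDITION & SPEC =====
-- Pre_ excludes exactly the inputs where A raises IndexError: n > len(a) (a[i] out of range).
def Pre_solve (n : Int) (x : Int) (a : List Int) : Prop := n ≤ (a.length : Int)
instance (n : Int) (x : Int) (a : List Int) : Decidable (Pre_solve n x a) := by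
  unfold Pre_solve; infer_instance
def pvWitness_solve : Int × Int × List Int := (2, 3, [1, 5])

def Spec_solve (n : Int) (x : Int) (a : List Int) (out : Int) : Prop := out = solve_alt n x a
instance (n : Int) (x : Int) (a : List Int) (out : Int) : Decidable (Spec_solve n x a out) := by
  unfold Spec_solve; infer_instance

-- ===== CLAIM (what is proved, stated in full; the proofs are below) =====
def Claim_equal_solve : Prop :=
  ∀ (n : Int) (x : Int) (a : List Int), Dom_solve n x a → Pre_solve n x a →
    Spec_solve n x a (solve n x a)

-- ===== LEMMAS AND PROOFS =====

-- The two binary searches are the same recursion.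
theorem solveSearch_eq_altLocate (pref : List Int) (base x lo hi : Int) :
    solveSearch pref base x lo hi = altLocate pref base x lo hi := by
  have H : ∀ (fuel : Nat) (lo hi : Int), (hi - lo).toNat ≤ fuel →
      solveSearch pref base x lo hi = altLocate pref base x lo hi := by
    intro fuel
    induction fuel with
    | zero =>
        intro lo hi hf
        rw [solveSearch, altLocate]
        simp only [dif_neg (by omega : ¬ lo < hi), dif_pos (by omega : hi ≤ lo)]
    | succ f ihf =>
        intro lo hi hf
        rw [solveSearch, altLocate]
        by_cases h : lo < hi
        · have hb := PySem.Int.floordiv_two_mid_bounds (le_of_lt h)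
          have h2 : PySem.Int.floordiv (lo + hi) 2 < hi :=
            (PySem.Int.floordiv_lt_iff_lt_mul (by omega)).mpr (by omega)
          simp only [dif_pos h, dif_neg (by omega : ¬ hi ≤ lo)]
          split
          · exact ihf lo _ (by omega)
          · exact ihf _ hi (by omega)
        · simp only [dif_neg h, dif_pos (by omega : hi ≤ lo)]
  exact H (hi - lo).toNat lo hi le_rfl

-- Result bounds of the search.
theorem altLocate_bounds (pref : List Int) (base x lo hi : Int) (h : lo ≤ hi) :
    lo ≤ altLocate pref base x lo hi ∧ altLocate pref base x lo hi ≤ hi := by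
  have H : ∀ (fuel : Nat) (lo hi : Int), (hi - lo).toNat ≤ fuel → lo ≤ hi →
      lo ≤ altLocate pref base x lo hi ∧ altLocate pref base x lo hi ≤ hi := by
    intro fuel
    induction fuel with
    | zero =>
        intro lo hi hf hle
        rw [altLocate]
        simp only [dif_pos (by omega : hi ≤ lo)]
        omega
    | succ f ihf =>
        intro lo hi hf hle
        rw [altLocate]
        by_cases h : hi ≤ lo
        · simp only [dif_pos h]; omega
        · have hb := PySem.Int.floordiv_two_mid_bounds (by omega : lo ≤ hi)
          have h2 : PySem.Int.floordiv (lo + hi) 2 < hi :=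
            (PySem.Int.floordiv_lt_iff_lt_mul (by omega)).mpr (by omega)
          simp only [dif_neg h]
          split
          · have := ihf lo (PySem.Int.floordiv (lo + hi) 2) (by omega) (by omega)
            omega
          · have := ihf (PySem.Int.floordiv (lo + hi) 2 + 1) hi (by omega) (by omega)
            omega
  exact H (hi - lo).toNat lo hi le_rfl h

-- The chain of (i, left_i) pairs produced by the descending loop, i = m, m-1, …, 1,
-- starting with right_boundary rb; `.1` is the final right_boundary.
def chainB (pref : List Int) (x : Int) : Nat → Int → Int × List (Int × Int)
  | 0, rb => (rb, [])
  | k + 1, rb =>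
      let i : Int := (k : Int) + 1
      let l := altLocate pref (PySem.List.pyGetD pref (i - 1) 0) x i rb
      let rest := chainB pref x k l
      (rest.1, (i, l) :: rest.2)

theorem chainB_keys (pref : List Int) (x : Int) (m : Nat) (rb : Int) :
    (chainB pref x m rb).2.map (·.1) = PySem.List.pyRange (m : Int) 0 (-1) := by
  induction m generalizing rb with
  | zero => simp [chainB, PySem.List.pyRange_neg_one_eq_nil (le_refl (0 : Int))]
  | succ k ih =>
      rw [chainB, PySem.List.pyRange_neg_one_cons (by exact_mod_cast Nat.succ_pos k)]
      have hc : ((k + 1 : Nat) : Int) - 1 = (k : Int) := by push_cast; ring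
      rw [hc]
      simp only [List.map_cons, ih]
      push_cast
      constructor

theorem chainB_bounds (pref : List Int) (x : Int) (m : Nat) (rb : Int)
    (h : (m : Int) ≤ rb) :
    ∀ p ∈ (chainB pref x m rb).2, 1 ≤ p.1 ∧ p.1 ≤ p.2 ∧ p.2 ≤ rb := by
  induction m generalizing rb with
  | zero => simp [chainB]
  | succ k ih =>
      rw [chainB]
      intro p hp
      have hloc := altLocate_bounds pref
        (PySem.List.pyGetD pref (((k : Int) + 1) - 1) 0) x ((k : Int) + 1) rb
        (by push_cast at h; omega)
      simp only [List.mem_cons] at hp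
      rcases hp with rfl | hp
      · refine ⟨by omega, by omega, by omega⟩
      · have := ih (rb := altLocate pref
          (PySem.List.pyGetD pref (((k : Int) + 1) - 1) 0) x ((k : Int) + 1) rb)
          (by omega) p hp
        omega

-- B's phase-1 fold computes the chain.
theorem phase1_eq_chainB (pref : List Int) (x : Int) (m : Nat) (rb : Int)
    (acc : List (Int × Int)) :
    (PySem.List.pyRange (m : Int) 0 (-1)).foldl (altPhase1Step pref x) (rb, acc)
      = ((chainB pref x m rb).1, acc ++ (chainB pref x m rb).2) := by
  induction m generalizing rb acc with
  | zero => simp [chainB, PySem.List.pyRange_neg_one_eq_nil (le_refl (0 : Int))]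
  | succ k ih =>
      rw [chainB, PySem.List.pyRange_neg_one_cons (by exact_mod_cast Nat.succ_pos k)]
      have hc : ((k + 1 : Nat) : Int) - 1 = (k : Int) := by push_cast; ring
      rw [hc]
      simp only [List.foldl_cons]
      rw [show ((k + 1 : Nat) : Int) = (k : Int) + 1 from by push_cast; ring]
      rw [altPhase1Step]
      simp only []
      rw [ih]
      simp

-- A's descending fold computes the same chain, applying the dp updates along the way.
def updStep (n : Int) (dp : List Int) (p : Int × Int) : List Int :=
  PySem.List.pySetD dp p.1
    (if p.2 ≤ n then PySem.List.pyGetD dp (p.2 + 1) 0 + (p.2 - p.1) else p.2 - p.1)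

theorem foldA_eq_chainB (n x : Int) (pref : List Int) (m : Nat) (rb : Int) (dp : List Int) :
    (PySem.List.pyRange (m : Int) 0 (-1)).foldl (solveStep n x pref) (dp, rb)
      = ((chainB pref x m rb).2.foldl (updStep n) dp, (chainB pref x m rb).1) := by
  induction m generalizing rb dp with
  | zero => simp [chainB, PySem.List.pyRange_neg_one_eq_nil (le_refl (0 : Int))]
  | succ k ih =>
      rw [chainB, PySem.List.pyRange_neg_one_cons (by exact_mod_cast Nat.succ_pos k)]
      have hc : ((k + 1 : Nat) : Int) - 1 = (k : Int) := by push_cast; ring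
      rw [hc]
      simp only [List.foldl_cons]
      rw [show ((k + 1 : Nat) : Int) = (k : Int) + 1 from by push_cast; ring]
      rw [solveStep]
      simp only [solveSearch_eq_altLocate]
      rw [ih]
      simp [updStep]

-- The dp values, read off an ascending pair list (head = smallest key).
def dpRecB : List (Int × Int) → (Int → Int) → Int → Int
  | [], base, j => base j
  | p :: rest, base, j =>
      if j = p.1 then (p.2 - p.1) + dpRecB rest base (p.2 + 1) else dpRecB rest base j

theorem dpRecB_append (ys zs : List (Int × Int)) (base : Int → Int) (j : Int) :
    dpRecB (ys ++ zs) base j = dpRecB ys (dpRecB zs base) j := by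
  induction ys generalizing j with
  | nil => rfl
  | cons p rest ih => simp only [List.cons_append, dpRecB, ih]

theorem dpRecB_congr (ys : List (Int × Int)) (base base' : Int → Int)
    (hb : ∀ j, 0 ≤ j → base j = base' j) (hy : ∀ p ∈ ys, 0 ≤ p.2 + 1) (j : Int) (hj : 0 ≤ j) :
    dpRecB ys base j = dpRecB ys base' j := by
  induction ys generalizing j with
  | nil => exact hb j hj
  | cons p rest ih =>
      simp only [dpRecB]
      have hp := hy p (List.mem_cons_self ..)
      split
      · rw [ih (fun q hq => hy q (List.mem_cons_of_mem _ hq)) _ (by omega)]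
      · rw [ih (fun q hq => hy q (List.mem_cons_of_mem _ hq)) _ hj]

theorem dpRecB_nonkey (ys : List (Int × Int)) (base : Int → Int) (j : Int)
    (h : j ∉ ys.map (·.1)) : dpRecB ys base j = base j := by
  induction ys with
  | nil => rfl
  | cons p rest ih =>
      simp only [List.map_cons, List.mem_cons] at h
      push Not at h
      simp only [dpRecB, if_neg h.1]
      exact ih h.2

-- A's dp array after applying the chain updates reads as dpRecB of the reversed chain.
theorem foldA_dp (n : Int) (C : List (Int × Int)) (dp : List Int)
    (hC : ∀ p ∈ C, 1 ≤ p.1 ∧ p.1 ≤ p.2 ∧ p.2 ≤ n + 1)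
    (hlen : (dp.length : Int) = n + 2) (j : Int) (hj : 0 ≤ j) :
    PySem.List.pyGetD (C.foldl (updStep n) dp) j 0
      = dpRecB C.reverse (fun j' => PySem.List.pyGetD dp j' 0) j := by
  induction C generalizing dp j with
  | nil => simp [dpRecB]
  | cons p rest ih =>
      have hp := hC p (List.mem_cons_self ..)
      have hrest : ∀ q ∈ rest, 1 ≤ q.1 ∧ q.1 ≤ q.2 ∧ q.2 ≤ n + 1 :=
        fun q hq => hC q (List.mem_cons_of_mem _ hq)
      have hlen2 : ((updStep n dp p).length : Int) = n + 2 := by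
        simp [updStep, PySem.List.length_pySetD, hlen]
      simp only [List.foldl_cons, List.reverse_cons]
      rw [dpRecB_append, ih _ hrest hlen2 _ hj]
      apply dpRecB_congr
      · intro j' hj'
        simp only [dpRecB, updStep]
        rw [PySem.List.pySetD_of_nonneg (i := p.1) _ _ (by omega)]
        rw [show j' = ((j'.toNat : Nat) : Int) from by omega, PySem.List.pyGetD_natCast]
        by_cases hjp : (j'.toNat : Int) = p.1
        · rw [if_pos hjp]
          have hk : j'.toNat = p.1.toNat := by omega
          rw [hk]
          have hsetlt : p.1.toNat < dp.length := by omega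
          have : (dp.set p.1.toNat
              (if p.2 ≤ n then PySem.List.pyGetD dp (p.2 + 1) 0 + (p.2 - p.1)
               else p.2 - p.1)).getD p.1.toNat 0
              = (if p.2 ≤ n then PySem.List.pyGetD dp (p.2 + 1) 0 + (p.2 - p.1)
                 else p.2 - p.1) := by
            simp [List.getD, hsetlt]
          rw [this]
          by_cases hb2 : p.2 ≤ n
          · rw [if_pos hb2]; ring
          · rw [if_neg hb2]
            have he : p.2 + 1 = ((dp.length : Nat) : Int) := by omega
            rw [he, PySem.List.pyGetD_natCast, List.getD_eq_default _ _ (le_refl _)]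
            ring
        · rw [if_neg hjp]
          have hne : j'.toNat ≠ p.1.toNat := by omega
          rw [List.getD, List.getElem?_set_ne (by omega), ← List.getD, PySem.List.pyGetD_natCast]
      · intro q hq
        rw [List.mem_reverse] at hq
        have := hrest q hq
        omega
      · exact hj

theorem foldA_length (n : Int) (C : List (Int × Int)) (dp : List Int) :
    (C.foldl (updStep n) dp).length = dp.length := by
  induction C generalizing dp with
  | nil => rfl
  | cons p rest ih =>
      simp only [List.foldl_cons, ih]
      simp [updStep, PySem.List.length_pySetD]

-- dp recurrence at a key of an ascending, consecutive-key list.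
theorem dpRecB_pair (ys : List (Int × Int)) (base : Int → Int) (lo hi : Int)
    (hkeys : ys.map (·.1) = PySem.List.pyRange lo hi 1)
    (hb : ∀ p ∈ ys, p.1 ≤ p.2) :
    ∀ i l, (i, l) ∈ ys → dpRecB ys base i = (l - i) + dpRecB ys base (l + 1) := by
  induction ys generalizing lo with
  | nil => intro i l h; simp at h
  | cons p rest ih =>
      have hlt : lo < hi := by
        by_contra hcon
        rw [PySem.List.pyRange_one_eq_nil (by omega)] at hkeys
        simp at hkeys
      rw [PySem.List.pyRange_one_cons hlt] at hkeys
      simp only [List.map_cons, List.cons.injEq] at hkeys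
      obtain ⟨hp1, hrest⟩ := hkeys
      intro i l hmem
      rcases List.mem_cons.mp hmem with heq | hmem2
      · subst heq
        have hil : i ≤ l := hb (i, l) (List.mem_cons_self ..)
        simp only [dpRecB]
        simp only [if_true, if_neg (by omega : ¬ l + 1 = i)]
      · have hkey : i ∈ rest.map (·.1) := List.mem_map.mpr ⟨(i, l), hmem2, rfl⟩
        have hge : lo + 1 ≤ i := by
          rw [hrest] at hkey
          exact (PySem.List.mem_pyRange_one.mp hkey).1
        have hil : i ≤ l := hb (i, l) (List.mem_cons_of_mem _ hmem2)
        simp only [dpRecB, if_neg (by omega : ¬ i = p.1),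
          if_neg (by omega : ¬ l + 1 = p.1)]
        exact ih (lo + 1) hrest (fun q hq => hb q (List.mem_cons_of_mem _ hq)) i l hmem2

-- Sums over integer ranges, as lists.
def listSum (lo hi : Int) (f : Int → Int) : Int :=
  ((PySem.List.pyRange lo hi 1).map f).sum

theorem listSum_nil (lo hi : Int) (f : Int → Int) (h : hi ≤ lo) : listSum lo hi f = 0 := by
  simp [listSum, PySem.List.pyRange_one_eq_nil h]

theorem listSum_cons (lo hi : Int) (f : Int → Int) (h : lo < hi) :
    listSum lo hi f = f lo + listSum (lo + 1) hi f := by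
  simp [listSum, PySem.List.pyRange_one_cons h]

theorem listSum_snoc (lo hi : Int) (f : Int → Int) (h : lo ≤ hi) :
    listSum lo (hi + 1) f = listSum lo hi f + f hi := by
  simp [listSum, PySem.List.pyRange_one_succ_right h]

theorem listSum_congr (lo hi : Int) (f g : Int → Int)
    (h : ∀ j, lo ≤ j → j < hi → f j = g j) : listSum lo hi f = listSum lo hi g := by
  unfold listSum
  rw [List.map_congr_left]
  intro j hj
  rw [PySem.List.mem_pyRange_one] at hj
  exact h j hj.1 hj.2

theorem listSum_update (lo hi j0 : Int) (f g : Int → Int)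
    (h : ∀ j, j ≠ j0 → f j = g j) (h1 : lo ≤ j0) (h2 : j0 < hi) :
    listSum lo hi f = listSum lo hi g + (f j0 - g j0) := by
  have hs : ∀ F : Int → Int, listSum lo hi F
      = listSum lo j0 F + (F j0 + listSum (j0 + 1) hi F) := by
    intro F
    rw [show listSum lo hi F = listSum lo j0 F + listSum j0 hi F from by
      unfold listSum
      rw [PySem.List.pyRange_one_append lo j0 hi (by omega) (by omega), List.map_append,
        List.sum_append]]
    rw [listSum_cons j0 hi F h2]
  rw [hs f, hs g]
  have e1 : listSum lo j0 f = listSum lo j0 g :=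
    listSum_congr _ _ _ _ (fun j _ hj => h j (by omega))
  have e2 : listSum (j0 + 1) hi f = listSum (j0 + 1) hi g :=
    listSum_congr _ _ _ _ (fun j hj _ => h j (by omega))
  rw [e1, e2]
  ring

-- B's phase 2 with the bucket as a plain function.
def phase2F : List (Int × Int) → Int × (Int → Int) → Int × (Int → Int)
  | [], st => st
  | p :: rest, st =>
      let m := 1 + st.2 p.1
      phase2F rest (st.1 + (p.2 - p.1) * m,
        fun j => if j = p.2 + 1 then st.2 (p.2 + 1) + m else st.2 j)

theorem phase2_dict_couple (ys : List (Int × Int)) (tot : Int) (d : PySem.Dict Int Int)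
    (B : Int → Int) (hd : ∀ j, d.getD j 0 = B j) :
    (ys.foldl altPhase2Step (tot, d)).1 = (phase2F ys (tot, B)).1 := by
  induction ys generalizing tot d B with
  | nil => rfl
  | cons p rest ih =>
      simp only [List.foldl_cons, phase2F, altPhase2Step]
      rw [hd p.1]
      apply ih
      intro j
      rw [PySem.Dict.getD_insert]
      rw [hd (p.2 + 1), hd j]

-- The key summation invariant of the forward multiplicity pass.
theorem phase2_inv (nn : Int) (D : Int → Int) :
    ∀ (ys : List (Int × Int)) (k tot : Int) (B : Int → Int),
    ys.map (·.1) = PySem.List.pyRange (k + 1) (k + 1 + ys.length) 1 →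
    (∀ p ∈ ys, p.1 ≤ p.2 ∧ p.2 ≤ nn) →
    (∀ i l, (i, l) ∈ ys → D i = (l - i) + D (l + 1)) →
    (phase2F ys (tot, B)).1
        + listSum (k + 1 + ys.length) (nn + 2) (fun j => (phase2F ys (tot, B)).2 j * D j)
      = tot + listSum (k + 1) (nn + 2) (fun j => B j * D j)
        + listSum (k + 1) (k + 1 + ys.length) D := by
  intro ys
  induction ys with
  | nil =>
      intro k tot B hkeys hbnd hD
      simp only [phase2F, List.length_nil, Nat.cast_zero, add_zero]
      rw [listSum_nil (k + 1) (k + 1) D le_rfl]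
      ring
  | cons p rest ih =>
      intro k tot B hkeys hbnd hD
      have hlen : ((p :: rest).length : Int) = (rest.length : Int) + 1 := by
        push_cast [List.length_cons]; ring
      have hklt : k + 1 < k + 1 + ((p :: rest).length : Int) := by
        rw [hlen]; omega
      rw [PySem.List.pyRange_one_cons hklt] at hkeys
      simp only [List.map_cons, List.cons.injEq] at hkeys
      obtain ⟨hp1, hrestkeys⟩ := hkeys
      have hpb := hbnd p (List.mem_cons_self ..)
      have hDhead : D p.1 = (p.2 - p.1) + D (p.2 + 1) :=
        hD p.1 p.2 (by simp)
      have heq : k + 1 + ((p :: rest).length : Int)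
          = (k + 1) + 1 + (rest.length : Int) := by rw [hlen]; ring
      rw [heq] at hrestkeys ⊢
      simp only [phase2F]
      rw [ih (k + 1) _ _ hrestkeys
        (fun q hq => hbnd q (List.mem_cons_of_mem _ hq))
        (fun i l hm => hD i l (List.mem_cons_of_mem _ hm))]
      rw [listSum_cons (k + 1) (nn + 2) _ (by omega : k + 1 < nn + 2)]
      rw [listSum_cons (k + 1) ((k + 1) + 1 + (rest.length : Int)) D (by omega)]
      rw [listSum_update ((k + 1) + 1) (nn + 2) (p.2 + 1)
        (fun j => (if j = p.2 + 1 then B (p.2 + 1) + (1 + B p.1) else B j) * D j)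
        (fun j => B j * D j)
        (fun j hj => by simp [if_neg hj]) (by omega) (by omega)]
      rw [← hp1, hDhead]
      simp only [if_true]
      ring

theorem listSum_zero (lo hi : Int) : listSum lo hi (fun _ => (0 : Int)) = 0 := by
  simp [listSum]

-- The prefix-sum lists built by A and by B are both the partial-sum table.
theorem prefA_eq (a : List Int) (N : Nat) (hN : N ≤ a.length) :
    ∀ k : Nat, k ≤ N →
    (PySem.List.pyRange 0 (k : Int) 1).foldl (solvePrefStep a) (List.replicate (N + 1) 0)
      = (List.range (k + 1)).map (fun j => (a.take j).sum) ++ List.replicate (N - k) 0 := by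
  intro k
  induction k with
  | zero =>
      intro _
      simp only [Nat.cast_zero]
      rw [PySem.List.pyRange_one_eq_nil le_rfl]
      simp [List.replicate_succ]
  | succ k ih =>
      intro hk
      rw [show ((k + 1 : Nat) : Int) = (k : Int) + 1 from by push_cast; ring]
      rw [PySem.List.pyRange_one_succ_right (by positivity)]
      rw [List.foldl_append]
      rw [ih (by omega)]
      simp only [List.foldl_cons, List.foldl_nil]
      rw [solvePrefStep]
      have hklt : k < a.length := by omega
      have hLget : PySem.List.pyGetD
          ((List.range (k + 1)).map (fun j => (a.take j).sum) ++ List.replicate (N - k) (0 : Int))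
          (k : Int) 0 = (a.take k).sum := by
        rw [PySem.List.pyGetD_natCast, List.getD_eq_getElem?_getD,
          List.getElem?_append_left (by simp)]
        simp
      have haget : PySem.List.pyGetD a (k : Int) 0 = a[k] := by
        rw [PySem.List.pyGetD_natCast, List.getD_eq_getElem?_getD,
          List.getElem?_eq_getElem hklt]
        rfl
      rw [hLget, haget]
      rw [show (k : Int) + 1 = ((k + 1 : Nat) : Int) from by push_cast; ring,
        PySem.List.pySetD_natCast]
      rw [List.set_append]
      simp only [List.length_map, List.length_range, lt_irrefl, if_false, Nat.sub_self]
      rw [show N - k = (N - (k + 1)) + 1 from by omega, List.replicate_succ,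
        List.set_cons_zero]
      conv_rhs => rw [List.range_succ]
      rw [List.map_append, List.map_singleton, List.sum_take_succ a k hklt]
      simp

theorem prefB_eq (a : List Int) (N : Nat) (hN : N ≤ a.length) :
    ∀ k : Nat, k ≤ N →
    (a.take k).foldl altPrefStep [0]
      = (List.range (k + 1)).map (fun j => (a.take j).sum) := by
  intro k
  induction k with
  | zero => simp
  | succ k ih =>
      intro hk
      have hklt : k < a.length := by omega
      rw [List.take_succ, List.getElem?_eq_getElem hklt]
      simp only [Option.toList_some]
      rw [List.foldl_append, ih (by omega)]
      simp only [List.foldl_cons, List.foldl_nil]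
      rw [altPrefStep]
      have hne : (List.range (k + 1)).map (fun j => (a.take j).sum) ≠ [] := by simp
      rw [PySem.List.pyGetD_neg_one _ _ hne]
      rw [List.getLast_eq_getElem]
      simp only [List.length_map, List.length_range, Nat.add_sub_cancel, List.getElem_map,
        List.getElem_range]
      conv_rhs => rw [List.range_succ]
      rw [List.map_append, List.map_singleton, List.sum_take_succ a k hklt]

-- ===== VERDICT (by name: the statement is the Claim_ definition above) =====
theorem solve_spec : Claim_equal_solve := by
  unfold Claim_equal_solve
  intro n x a _hdom hpre
  unfold Spec_solve
  by_cases hn : n ≤ 0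
  · simp only [solve, solve_alt]
    rw [PySem.List.pyRange_neg_one_eq_nil hn]
    simp [List.sum_replicate]
  · obtain ⟨N, rfl⟩ : ∃ N : Nat, n = (N : Int) := ⟨n.toNat, by omega⟩
    have hNpos : 0 < N := by omega
    have hNa : N ≤ a.length := by
      unfold Pre_solve at hpre
      omega
    simp only [solve, solve_alt]
    rw [show ((N : Int) + 1).toNat = N + 1 from by omega,
      show ((N : Int) + 2).toNat = N + 2 from by omega]
    rw [prefA_eq a N hNa N le_rfl]
    rw [Nat.sub_self, List.replicate_zero, List.append_nil]
    rw [max_eq_left (by positivity : (0 : Int) ≤ (N : Int))]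
    rw [PySem.List.slice_to _ (by positivity), Int.toNat_natCast]
    rw [prefB_eq a N hNa N le_rfl]
    set P := (List.range (N + 1)).map (fun j => (a.take j).sum) with hP
    rw [phase1_eq_chainB P x N ((N : Int) + 1) []]
    rw [foldA_eq_chainB (N : Int) x P N ((N : Int) + 1) (List.replicate (N + 2) 0)]
    simp only [List.nil_append]
    set C := (chainB P x N ((N : Int) + 1)).2 with hCdef
    have hCb : ∀ p ∈ C, 1 ≤ p.1 ∧ p.1 ≤ p.2 ∧ p.2 ≤ (N : Int) + 1 :=
      chainB_bounds P x N ((N : Int) + 1) (by omega)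
    have hkeysC : C.map (·.1) = PySem.List.pyRange (N : Int) 0 (-1) := chainB_keys P x N _
    have hkeysR : C.reverse.map (·.1) = PySem.List.pyRange 1 ((N : Int) + 1) 1 := by
      rw [List.map_reverse, hkeysC, PySem.List.pyRange_neg_one_eq_reverse,
        List.reverse_reverse]
      norm_num
    have hClen : (C.length : Int) = (N : Int) := by
      have h1 := congrArg List.length hkeysC
      rw [List.length_map, PySem.List.length_pyRange_neg_one] at h1
      omega
    set D := dpRecB C.reverse (fun _ => (0 : Int)) with hD
    have hDpair : ∀ i l, (i, l) ∈ C.reverse → D i = (l - i) + D (l + 1) :=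
      dpRecB_pair C.reverse _ 1 ((N : Int) + 1) hkeysR
        (fun p hp => by have := hCb p (List.mem_reverse.mp hp); omega)
    have hD0 : D 0 = 0 := by
      rw [hD, dpRecB_nonkey]
      rw [hkeysR]
      simp [PySem.List.mem_pyRange_one]
    have hDtop : ∀ j, (N : Int) + 1 ≤ j → D j = 0 := by
      intro j hj
      rw [hD, dpRecB_nonkey]
      rw [hkeysR]
      simp only [PySem.List.mem_pyRange_one]
      omega
    have hbase : ∀ j : Int, 0 ≤ j →
        PySem.List.pyGetD (List.replicate (N + 2) (0 : Int)) j 0 = 0 := by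
      intro j hj
      rw [show j = ((j.toNat : Nat) : Int) from by omega, PySem.List.pyGetD_natCast]
      rcases lt_or_ge j.toNat (N + 2) with h | h
      · simp [List.getD_eq_getElem?_getD, List.getElem?_replicate, h]
      · rw [List.getD_eq_default _ _ (by simpa using h)]
    have hdpj : ∀ j : Int, 0 ≤ j →
        PySem.List.pyGetD (C.foldl (updStep (N : Int)) (List.replicate (N + 2) 0)) j 0
          = D j := by
      intro j hj
      rw [foldA_dp (N : Int) C (List.replicate (N + 2) 0) hCb (by simp) j hj]
      exact dpRecB_congr C.reverse _ _ (fun j' hj' => hbase j' hj')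
        (fun p hp => by have := hCb p (List.mem_reverse.mp hp); omega) j hj
    have hsumA : (C.foldl (updStep (N : Int)) (List.replicate (N + 2) 0)).sum
        = listSum 0 ((N : Int) + 2) D := by
      conv_lhs => rw [← PySem.List.map_pyGetD_pyRange_zero'
        (C.foldl (updStep (N : Int)) (List.replicate (N + 2) 0)) 0]
      rw [show ((C.foldl (updStep (N : Int)) (List.replicate (N + 2) 0)).length : Int)
          = (N : Int) + 2 from by rw [foldA_length]; simp]
      unfold listSum
      rw [List.map_congr_left
        (fun j hj => hdpj j ((PySem.List.mem_pyRange_one.mp hj).1))]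
    have hA2 : listSum 0 ((N : Int) + 2) D = listSum 1 ((N : Int) + 1) D := by
      rw [listSum_cons 0 ((N : Int) + 2) D (by omega)]
      simp only [zero_add]
      rw [show ((N : Int) + 2) = ((N : Int) + 1) + 1 from by ring,
        listSum_snoc 1 ((N : Int) + 1) D (by omega)]
      rw [hD0, hDtop ((N : Int) + 1) le_rfl]
      ring
    rw [hsumA, hA2]
    rw [phase2_dict_couple C.reverse 0 PySem.Dict.empty (fun _ => 0)
      (fun j => PySem.Dict.getD_empty j 0)]
    have hk2 : C.reverse.map (·.1)
        = PySem.List.pyRange (0 + 1) (0 + 1 + (C.reverse.length : Int)) 1 := by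
      rw [hkeysR, List.length_reverse, hClen]
      congr 1
      omega
    have hinv := phase2_inv ((N : Int) + 1) D C.reverse 0 0 (fun _ => 0) hk2
      (fun p hp => by have := hCb p (List.mem_reverse.mp hp); omega)
      hDpair
    have hzero1 : listSum (0 + 1 + (C.reverse.length : Int)) ((N : Int) + 1 + 2)
        (fun j => (phase2F C.reverse (0, fun _ => 0)).2 j * D j) = 0 := by
      rw [listSum_congr _ _ _ (fun _ => (0 : Int))
        (fun j hj1 hj2 => by
          rw [List.length_reverse, hClen] at hj1
          rw [hDtop j (by omega), mul_zero])]
      exact listSum_zero _ _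
    have hzero2 : listSum (0 + 1) ((N : Int) + 1 + 2)
        (fun j => (fun _ => (0 : Int)) j * D j) = 0 := by
      rw [listSum_congr _ _ _ (fun _ => (0 : Int)) (fun j _ _ => zero_mul (D j))]
      exact listSum_zero _ _
    rw [hzero1, hzero2] at hinv
    rw [List.length_reverse, hClen] at hinv
    have : (phase2F C.reverse (0, fun _ => (0 : Int))).1 = listSum (0 + 1) (0 + 1 + (N : Int)) D := by
      omega
    rw [this]
    rw [show (0 : Int) + 1 = 1 from by ring, show (1 : Int) + (N : Int) = (N : Int) + 1 from by ring]
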